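-- pv_equiv track=rewrite | github.com/aihaysteve/local-rag | src/ragling/path_mapping.py | apply_forward
-- ===== SOURCE A (Python) =====
-- def apply_forward(path: str, mappings: dict[str, str]) -> str:
--     """Map a host path to a container path (longest prefix match).
--
--     Args:
--         path: Host-side path.
--         mappings: {host_prefix: container_prefix} dict.
--
--     Returns:
--         Mapped path, or original if no prefix matches.
--     """
--     best_prefix = ""
--     best_replacement = ""
--     for host_prefix, container_prefix in mappings.items():
--         if path.startswith(host_prefix) and len(host_prefix) > len(best_prefix):
--             best_prefix = host_prefix
--             best_replacement = container_prefix
--     if best_prefix: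
--         return best_replacement + path[len(best_prefix) :]
--     return path
-- ===== SOURCE B (Python) =====
-- def apply_forward(path: str, mappings: dict[str, str]) -> str:
--     """Map a host path to a container path (longest prefix match).
--
--     Tries the distinct key lengths, longest first, with one dict lookup per
--     candidate prefix of `path`, instead of scanning all mapping items.
--     """
--     n = len(path)
--     for i in reversed(sorted({len(k) for k in mappings})):
--         if 0 < i <= n and path[:i] in mappings:
--             return mappings[path[:i]] + path[i:]
--     return path
-- ===== Notes on version B (the rewrite author's own statement) =====
-- stated objective: alternative
-- what changed: B tries the distinct mapping-key lengths in descending order, testing one prefix of path per length with a dict lookup and returning on the first hit, instead of scanning all mapping items while maintaining a best-so-far prefix.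
import Mathlib
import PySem

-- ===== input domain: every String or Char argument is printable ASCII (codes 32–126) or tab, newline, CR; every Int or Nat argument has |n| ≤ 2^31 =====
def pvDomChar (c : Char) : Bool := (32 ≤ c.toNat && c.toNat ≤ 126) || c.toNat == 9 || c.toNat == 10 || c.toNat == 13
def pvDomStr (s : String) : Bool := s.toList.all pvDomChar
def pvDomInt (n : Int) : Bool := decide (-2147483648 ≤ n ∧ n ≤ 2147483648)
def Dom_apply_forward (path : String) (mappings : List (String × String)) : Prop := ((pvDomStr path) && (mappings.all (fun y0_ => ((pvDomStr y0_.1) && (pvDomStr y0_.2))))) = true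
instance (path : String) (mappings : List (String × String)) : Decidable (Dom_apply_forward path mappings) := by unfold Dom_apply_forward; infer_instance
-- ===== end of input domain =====

-- B tries the distinct mapping-key lengths in descending order, one dict lookup per candidate
-- prefix of `path`, instead of scanning all mapping items with a best-so-far prefix (objective: alternative).

-- ===== PORT A =====
-- the loop body: if path.startswith(host_prefix) and len(host_prefix) > len(best_prefix): update
def afStep (path : String) (st : String × String) (kv : String × String) : String × String :=
  if PySem.Str.startswith path kv.1 && decide (PySem.Str.len st.1 < PySem.Str.len kv.1) then kv else st

def apply_forward (path : String) (mappings : List (String × String)) : String :=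
  -- the dict parameter arrives as an association list: dict(mappings) is PySem.Dict.ofList
  let st := ((PySem.Dict.ofList mappings).items).foldl (afStep path) ("", "")
  if st.1 ≠ "" then String.ofList (st.2.toList ++ PySem.List.slice path.toList (some (PySem.Str.len st.1)) none)
  else path

-- ===== PORT B =====
-- for i in reversed(sorted({len(k) for k in mappings})):
--     if 0 < i <= n and path[:i] in mappings: return mappings[path[:i]] + path[i:]
def afLoop (path : String) (d : PySem.Dict String String) : List Int → String
  | [] => path
  | i :: rest =>
    if 0 < i ∧ i ≤ PySem.Str.len path then
      match d.get? (String.ofList (path.toList.take i.toNat)) with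
      | some v => String.ofList (v.toList ++ path.toList.drop i.toNat)
      | none => afLoop path d rest
    else afLoop path d rest

def apply_forward_alt (path : String) (mappings : List (String × String)) : String :=
  let d := PySem.Dict.ofList mappings
  afLoop path d
    ((PySem.List.sorted (PySem.Set.ofList (d.keys.map (fun k => PySem.Str.len k))) (fun x => x) false).reverse)

-- ===== PRECONDITION & SPEC =====
def Spec_apply_forward (path : String) (mappings : List (String × String)) (out : String) : Prop := out = apply_forward_alt path mappings
instance (path : String) (mappings : List (String × String)) (out : String) : Decidable (Spec_apply_forward path mappings out) := by unfold Spec_apply_forward; infer_instance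

-- ===== CLAIM (what is proved, stated in full; the proofs are below) =====
def Claim_equal_apply_forward : Prop := ∀ (path : String) (mappings : List (String × String)), Dom_apply_forward path mappings → Spec_apply_forward path mappings (apply_forward path mappings)

-- ===== LEMMAS AND PROOFS =====

theorem str_len_eq' (s : String) : PySem.Str.len s = (s.toList.length : Int) := by
  simp [PySem.Str.len_eq]

-- the fold's invariant: the state's key length only grows; the result is either the initial
-- state or a matching item of the list; every matching key is no longer than the result's key
theorem afFold_spec (path : String) (L : List (String × String)) (st : String × String) :
    PySem.Str.len st.1 ≤ PySem.Str.len (L.foldl (afStep path) st).1 ∧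
    ((L.foldl (afStep path) st) = st ∨
      (PySem.Str.startswith path (L.foldl (afStep path) st).1 = true ∧
       (L.foldl (afStep path) st) ∈ L)) ∧
    (∀ kv ∈ L, PySem.Str.startswith path kv.1 = true →
       PySem.Str.len kv.1 ≤ PySem.Str.len (L.foldl (afStep path) st).1) := by
  induction L generalizing st with
  | nil => simp
  | cons hd tl ih =>
    simp only [List.foldl_cons]
    cases hc : (PySem.Str.startswith path hd.1 && decide (PySem.Str.len st.1 < PySem.Str.len hd.1)) with
    | true =>
      have hstep : afStep path st hd = hd := by unfold afStep; rw [hc]; rfl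
      rw [hstep]
      obtain ⟨h1, h2, h3⟩ := ih hd
      simp only [Bool.and_eq_true, decide_eq_true_eq] at hc
      refine ⟨by omega, ?_, ?_⟩
      · rcases h2 with h2 | h2
        · right; rw [h2]; exact ⟨hc.1, List.mem_cons_self⟩
        · right; exact ⟨h2.1, List.mem_cons_of_mem _ h2.2⟩
      · intro kv hkv hsw
        rcases List.mem_cons.mp hkv with rfl | hkv
        · omega
        · exact h3 kv hkv hsw
    | false =>
      have hstep : afStep path st hd = st := by unfold afStep; rw [hc]; rfl
      rw [hstep]
      obtain ⟨h1, h2, h3⟩ := ih st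
      refine ⟨h1, ?_, ?_⟩
      · rcases h2 with h2 | h2
        · left; exact h2
        · right; exact ⟨h2.1, List.mem_cons_of_mem _ h2.2⟩
      · intro kv hkv hsw
        rcases List.mem_cons.mp hkv with rfl | hkv
        · simp only [Bool.and_eq_false_iff] at hc
          rcases hc with hc | hc
          · rw [hsw] at hc; cases hc
          · simp only [decide_eq_false_iff_not, not_lt] at hc; omega
        · exact h3 kv hkv hsw

-- B's loop when every candidate length fails (out of range, or the prefix is not a key)
theorem afLoop_none (path : String) (d : PySem.Dict String String) (lst : List Int)
    (h : ∀ i ∈ lst, ¬(0 < i ∧ i ≤ PySem.Str.len path) ∨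
         d.get? (String.ofList (path.toList.take i.toNat)) = none) :
    afLoop path d lst = path := by
  induction lst with
  | nil => rfl
  | cons i0 rest ih =>
    unfold afLoop
    rcases h i0 List.mem_cons_self with hg | hn
    · rw [if_neg hg]
      exact ih (fun i hi => h i (List.mem_cons_of_mem _ hi))
    · split_ifs with hg
      · rw [hn]
        exact ih (fun i hi => h i (List.mem_cons_of_mem _ hi))
      · exact ih (fun i hi => h i (List.mem_cons_of_mem _ hi))

-- B's loop on a strictly decreasing candidate list, when j is a successful length
-- and every larger candidate fails
theorem afLoop_some (path : String) (d : PySem.Dict String String) (lst : List Int) (j : Int)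
    (v : String)
    (hsorted : lst.Pairwise (· > ·))
    (hjmem : j ∈ lst)
    (hguard : 0 < j ∧ j ≤ PySem.Str.len path)
    (hget : d.get? (String.ofList (path.toList.take j.toNat)) = some v)
    (hmax : ∀ i ∈ lst, j < i → ¬(0 < i ∧ i ≤ PySem.Str.len path) ∨
         d.get? (String.ofList (path.toList.take i.toNat)) = none) :
    afLoop path d lst = String.ofList (v.toList ++ path.toList.drop j.toNat) := by
  induction lst with
  | nil => cases hjmem
  | cons i0 rest ih =>
    have hpw := (List.pairwise_cons.mp hsorted)
    unfold afLoop
    rcases List.mem_cons.mp hjmem with rfl | hjrest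
    · rw [if_pos hguard, hget]
    · have hji0 : j < i0 := hpw.1 j hjrest
      rcases hmax i0 List.mem_cons_self hji0 with hg | hn
      · rw [if_neg hg]
        exact ih hpw.2 hjrest (fun i hi hji => hmax i (List.mem_cons_of_mem _ hi) hji)
      · split_ifs with hg
        · rw [hn]
          exact ih hpw.2 hjrest (fun i hi hji => hmax i (List.mem_cons_of_mem _ hi) hji)
        · exact ih hpw.2 hjrest (fun i hi hji => hmax i (List.mem_cons_of_mem _ hi) hji)

-- a key that matches path is the corresponding take of path
theorem startswith_key (path k : String) (h : PySem.Str.startswith path k = true) :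
    k.toList = path.toList.take k.toList.length ∧ k.toList.length ≤ path.toList.length := by
  have hp : k.toList <+: path.toList := by
    have he := PySem.Str.startswith_eq path k
    rw [he] at h
    exact (PySem.Chars.startswith_iff _ _).mp h
  exact ⟨List.prefix_iff_eq_take.mp hp, hp.length_le⟩

-- a key found by B's loop is an item of the dict and matches path
theorem get?_key_bound (path : String) (d : PySem.Dict String String)
    (j : Nat) (v : String)
    (hget : d.get? (String.ofList (path.toList.take j)) = some v) :
    PySem.Str.startswith path (String.ofList (path.toList.take j)) = true ∧
    (String.ofList (path.toList.take j), v) ∈ d.items := by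
  refine ⟨?_, PySem.Dict.mem_items_of_get?_eq_some _ hget⟩
  rw [PySem.Str.startswith_eq]
  refine (PySem.Chars.startswith_iff _ _).mpr ?_
  simp [List.take_prefix]

-- ===== VERDICT (by name: the statement is the Claim_ definition above) =====
theorem apply_forward_spec : Claim_equal_apply_forward := by
  intro path mappings _
  unfold Spec_apply_forward apply_forward apply_forward_alt
  simp only []
  set d := PySem.Dict.ofList mappings with hd
  set st := d.items.foldl (afStep path) ("", "") with hst
  set lst := (PySem.List.sorted (PySem.Set.ofList (d.keys.map (fun k => PySem.Str.len k)))
      (fun x => x) false).reverse with hlst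
  obtain ⟨h1, h2, h3⟩ := afFold_spec path d.items ("", "")
  rw [← hst] at h1 h2 h3
  have hnd : (d.keys).Nodup := PySem.Dict.nodup_keys_ofList mappings
  have hpw : lst.Pairwise (· > ·) := by
    rw [hlst, List.pairwise_reverse]
    exact PySem.List.sorted_ofList_pairwise_lt _
  have hmemlst : ∀ x : Int, x ∈ lst ↔ x ∈ d.keys.map (fun k => PySem.Str.len k) := by
    intro x
    rw [hlst, List.mem_reverse, PySem.List.mem_sorted, PySem.Set.mem_ofList]
  -- a successful candidate length bounds nothing more than a matching key length
  have hfail : ∀ i : Int, (0 < i ∧ i ≤ PySem.Str.len path) →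
      ∀ v, d.get? (String.ofList (path.toList.take i.toNat)) = some v →
      1 ≤ i.toNat ∧ i.toNat ≤ path.toList.length ∧ i.toNat ≤ st.1.toList.length := by
    intro i hg v hv
    obtain ⟨hsw, hmem⟩ := get?_key_bound path d i.toNat v hv
    have hip : i.toNat ≤ path.toList.length := by
      have := hg.2; rw [str_len_eq'] at this; omega
    have hlen : (path.toList.take i.toNat).length ≤ st.1.toList.length := by
      have hh := h3 _ hmem hsw
      rw [str_len_eq', str_len_eq'] at hh
      simp only [String.toList_ofList] at hh
      exact_mod_cast hh
    rw [List.length_take] at hlen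
    refine ⟨by omega, hip, by omega⟩
  by_cases hbe : st.1 = ""
  · -- A returns path; B's loop never finds a key
    simp only [hbe, ne_eq, not_true_eq_false, if_false]
    refine (afLoop_none path d lst ?_).symm
    intro i hi
    by_contra hcon
    push Not at hcon
    obtain ⟨hg, hne⟩ := hcon
    obtain ⟨v, hv⟩ := Option.ne_none_iff_exists'.mp hne
    obtain ⟨hi1, -, hile⟩ := hfail i hg v hv
    have hz : st.1.toList.length = 0 := by rw [hbe]; simp
    omega
  · -- A returns st.2 ++ path[len st.1:]; B's loop fires exactly at j = len st.1
    simp only [hbe, ne_eq, not_false_eq_true, if_true]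
    rcases h2 with h2 | h2
    · exact absurd (by rw [h2] : st.1 = "") hbe
    obtain ⟨hsw, hmemL⟩ := h2
    obtain ⟨hkeq, hklen⟩ := startswith_key path st.1 hsw
    have hj1 : 1 ≤ st.1.toList.length := by
      rcases Nat.eq_zero_or_pos st.1.toList.length with h0 | h0
      · exact absurd (by
          have hnil : st.1.toList = [] := List.length_eq_zero_iff.mp h0
          simpa using congrArg String.ofList hnil) hbe
      · exact h0
    set j : Int := (st.1.toList.length : Int) with hjdef
    have hjto : j.toNat = st.1.toList.length := by omega
    have hjmem : j ∈ lst := by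
      rw [hmemlst]
      refine List.mem_map.mpr ⟨st.1, ?_, (str_len_eq' st.1).symm⟩
      exact PySem.Dict.mem_keys_of_mem_items _ (by simpa using hmemL)
    have hguard : 0 < j ∧ j ≤ PySem.Str.len path := by
      constructor
      · omega
      · rw [str_len_eq', hjdef]; exact_mod_cast hklen
    have hget : d.get? (String.ofList (path.toList.take j.toNat)) = some st.2 := by
      rw [hjto, ← hkeq, String.ofList_toList]
      exact PySem.Dict.get?_of_mem_items _ (by simpa using hmemL) hnd
    have hmax : ∀ i ∈ lst, j < i → ¬(0 < i ∧ i ≤ PySem.Str.len path) ∨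
        d.get? (String.ofList (path.toList.take i.toNat)) = none := by
      intro i hi hji
      by_contra hcon
      push Not at hcon
      obtain ⟨hg, hne⟩ := hcon
      obtain ⟨v, hv⟩ := Option.ne_none_iff_exists'.mp hne
      obtain ⟨-, -, hile⟩ := hfail i hg v hv
      omega
    rw [afLoop_some path d lst j st.2 hpw hjmem hguard hget hmax]
    congr 2
    rw [str_len_eq', hjto, PySem.List.slice_from_natCast]
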